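-- pv_equiv track=rewrite | github.com/DavidLKing/genpara | zhang/supervised_code/processing.py | hasNull
-- ===== SOURCE A (Python) =====
-- def hasNull(alignments, lNumWords, rNumWords):
--     """包含了所有word的index的set！！！！"""
--     lSet = set(range(lNumWords))
--     rSet = set(range(rNumWords))
--     """对于每一对index-alignments"""
--     for pair in alignments:
--         pair = pair.split('-')
--         lVal = int(pair[0])
--         rVal = int(pair[1])
--         """把已经aligned了的index从set中去掉！！！！"""
--         if lVal in lSet:
--             lSet.remove(lVal)
--         if rVal in rSet:
--             rSet.remove(rVal)
--     lSet = list(lSet)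
--     rSet = list(rSet)
--     return(lSet, rSet)
-- ===== SOURCE B (Python) =====
-- def _complement(vals, n):
--     # sorted-merge complement: walk range(n) and the sorted aligned values together
--     vals = sorted(vals)
--     out = []
--     j = 0
--     for i in range(n):
--         while j < len(vals) and vals[j] < i:
--             j += 1
--         if j == len(vals) or vals[j] != i:
--             out.append(i)
--     return out
--
-- def hasNull(alignments, lNumWords, rNumWords):
--     lVals = []
--     rVals = []
--     for pair in alignments:
--         parts = pair.split('-')
--         lVals.append(int(parts[0]))
--         rVals.append(int(parts[1]))
--     return (_complement(lVals, lNumWords), _complement(rVals, rNumWords))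
-- ===== Notes on version B (the rewrite author's own statement) =====
-- stated objective: alternative
-- what changed: B collects the aligned left/right indices into plain lists, sorts each once, and produces the unaligned indices by a two-pointer merge of the sorted values against range(n), instead of A's hash-set universe with in-loop removals.
import Mathlib
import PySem

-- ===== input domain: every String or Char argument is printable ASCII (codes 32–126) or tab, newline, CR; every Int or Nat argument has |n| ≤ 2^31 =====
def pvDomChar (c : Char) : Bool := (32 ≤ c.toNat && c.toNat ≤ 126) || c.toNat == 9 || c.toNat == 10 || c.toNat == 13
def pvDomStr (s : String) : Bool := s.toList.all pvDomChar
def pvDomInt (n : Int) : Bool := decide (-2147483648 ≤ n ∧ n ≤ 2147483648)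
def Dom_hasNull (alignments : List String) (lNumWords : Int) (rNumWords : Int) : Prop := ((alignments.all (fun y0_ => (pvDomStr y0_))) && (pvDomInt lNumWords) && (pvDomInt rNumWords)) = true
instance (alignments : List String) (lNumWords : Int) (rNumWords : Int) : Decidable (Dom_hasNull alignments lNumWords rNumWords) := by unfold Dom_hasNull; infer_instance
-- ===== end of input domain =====

-- B replaces A's hash-set universe with in-loop removals by collecting the aligned
-- indices into lists, sorting each once, and producing the unaligned indices by a
-- two-pointer merge of the sorted values against the range (objective: alternative).
-- Both Pythons iterate a CPython set of small non-negative ints (A) resp. emit the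
-- range in order (B); CPython lists such a set in ascending value order, which the
-- A-port models directly.

-- shared parse of one 'l-r' pair (both Pythons run exactly this split/int code);
-- the getD defaults never fire under Pre_hasNull
def pvParse (s : String) : Int × Int :=
  let parts := (PySem.Str.split? s "-").getD []
  ((PySem.Int.ofStr? (parts.getD 0 "")).getD 0,
   (PySem.Int.ofStr? (parts.getD 1 "")).getD 0)

-- ===== PORT A =====
-- the loop body of A (split/parse, then conditional remove from each index set)
def hasNullStep (st : List Int × List Int) (pair : String) : List Int × List Int :=
  let lVal := (pvParse pair).1
  let rVal := (pvParse pair).2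
  let ls := if lVal ∈ st.1 then st.1.erase lVal else st.1
  let rs := if rVal ∈ st.2 then st.2.erase rVal else st.2
  (ls, rs)

def hasNull (alignments : List String) (lNumWords : Int) (rNumWords : Int) : List Int × List Int :=
  let init : List Int × List Int :=
    (PySem.List.pyRange 0 lNumWords 1, PySem.List.pyRange 0 rNumWords 1)
  alignments.foldl hasNullStep init

-- ===== PORT B =====
-- B's inner while loop: advance j past the sorted values below i
def pvAdvance (sv : List Int) (i : Int) (j : Nat) : Nat :=
  if h : j < sv.length then
    if sv[j] < i then pvAdvance sv i (j + 1) else j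
  else j
termination_by sv.length - j

-- B's for-loop body over i in range(n), state (j, out)
def pvCompStep (sv : List Int) (st : Nat × List Int) (i : Int) : Nat × List Int :=
  let j := pvAdvance sv i st.1
  if j = sv.length ∨ sv.getD j 0 ≠ i then (j, st.2 ++ [i]) else (j, st.2)

-- B's _complement helper: sort once, then merge against range(n)
def pvComplement (vals : List Int) (n : Int) : List Int :=
  ((PySem.List.pyRange 0 n 1).foldl
    (pvCompStep (PySem.List.sorted vals (fun x => x) false)) (0, [])).2

def hasNull_alt (alignments : List String) (lNumWords : Int) (rNumWords : Int) : List Int × List Int :=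
  let vals := alignments.foldl
    (fun st pair => (st.1 ++ [(pvParse pair).1], st.2 ++ [(pvParse pair).2])) ([], [])
  (pvComplement vals.1 lNumWords, pvComplement vals.2 rNumWords)

-- ===== PRECONDITION & SPEC =====
-- Pre_ admits exactly the inputs where Python A returns: every alignment string must
-- split on '-' into at least two parts whose first two parse as ints (otherwise
-- int()/indexing raises ValueError/IndexError in A, and in B alike).
def Pre_hasNull (alignments : List String) (lNumWords : Int) (rNumWords : Int) : Prop :=
  ∀ s ∈ alignments,
    2 ≤ ((PySem.Str.split? s "-").getD []).length ∧
    (PySem.Int.ofStr? (((PySem.Str.split? s "-").getD []).getD 0 "")).isSome = true ∧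
    (PySem.Int.ofStr? (((PySem.Str.split? s "-").getD []).getD 1 "")).isSome = true

instance (alignments : List String) (lNumWords : Int) (rNumWords : Int) : Decidable (Pre_hasNull alignments lNumWords rNumWords) := by unfold Pre_hasNull; infer_instance

def pvWitness_hasNull : List String × Int × Int := (["0-1", "2-0"], 3, 2)

def Spec_hasNull (alignments : List String) (lNumWords : Int) (rNumWords : Int) (out : List Int × List Int) : Prop := out = hasNull_alt alignments lNumWords rNumWords
instance (alignments : List String) (lNumWords : Int) (rNumWords : Int) (out : List Int × List Int) : Decidable (Spec_hasNull alignments lNumWords rNumWords out) := by unfold Spec_hasNull; infer_instance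

-- ===== CLAIM (what is proved, stated in full; the proofs are below) =====
def Claim_equal_hasNull : Prop := ∀ (alignments : List String) (lNumWords : Int) (rNumWords : Int), Dom_hasNull alignments lNumWords rNumWords → Pre_hasNull alignments lNumWords rNumWords → Spec_hasNull alignments lNumWords rNumWords (hasNull alignments lNumWords rNumWords)

-- ===== LEMMAS AND PROOFS =====

-- pvAdvance keeps the all-below-i prefix invariant and stops at length
-- or at an element ≥ i (stated with getD to avoid bound-proof plumbing)
lemma pvAdvance_spec (sv : List Int) (i : Int) (j : Nat)
    (hj : j ≤ sv.length) (hpre : ∀ k, k < j → sv.getD k 0 < i) :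
    pvAdvance sv i j ≤ sv.length ∧
    (∀ k, k < pvAdvance sv i j → sv.getD k 0 < i) ∧
    (pvAdvance sv i j < sv.length → ¬ sv.getD (pvAdvance sv i j) 0 < i) := by
  fun_induction pvAdvance sv i j with
  | case1 j h hlt ih =>
    exact ih (by omega) (fun k hk => by
      rcases Nat.lt_or_ge k j with h' | h'
      · exact hpre k h'
      · have hkj : k = j := by omega
        subst hkj
        rw [List.getD_eq_getElem sv 0 h]
        exact hlt)
  | case2 j h hlt =>
    refine ⟨Nat.le_of_lt h, hpre, fun _ => ?_⟩
    rw [List.getD_eq_getElem sv 0 h]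
    exact hlt
  | case3 j h => exact ⟨hj, hpre, fun h' => absurd h' h⟩

-- on a sorted list with the prefix-below-i invariant, B's append test decides i ∉ sv
lemma comp_test_iff (sv : List Int) (hs : sv.Pairwise (· ≤ ·)) (i : Int) (j' : Nat)
    (hle : j' ≤ sv.length) (hbelow : ∀ k, k < j' → sv.getD k 0 < i)
    (hstop : j' < sv.length → ¬ sv.getD j' 0 < i) :
    (j' = sv.length ∨ sv.getD j' 0 ≠ i) ↔ i ∉ sv := by
  constructor
  · rintro (heq | hne) hmem
    · subst heq
      obtain ⟨k, hk, hki⟩ := List.getElem_of_mem hmem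
      have := hbelow k hk
      rw [List.getD_eq_getElem sv 0 hk, hki] at this
      omega
    · obtain ⟨k, hk, hki⟩ := List.getElem_of_mem hmem
      have hj'len : j' < sv.length := by
        rcases Nat.lt_or_ge j' sv.length with h | h
        · exact h
        · have : j' = sv.length := by omega
          subst this
          have := hbelow k hk
          rw [List.getD_eq_getElem sv 0 hk, hki] at this
          omega
      have hkge : j' ≤ k := by
        by_contra h
        have := hbelow k (by omega)
        rw [List.getD_eq_getElem sv 0 hk, hki] at this
        omega
      have hle2 : sv[j'] ≤ sv[k] := by
        rcases Nat.eq_or_lt_of_le hkge with h | h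
        · simp [h]
        · exact List.pairwise_iff_getElem.mp hs j' k hj'len hk h
      have hge := hstop hj'len
      rw [List.getD_eq_getElem sv 0 hj'len] at hne hge
      omega
  · intro hnm
    rcases Nat.lt_or_ge j' sv.length with hj'len | h
    · refine Or.inr ?_
      rw [List.getD_eq_getElem sv 0 hj'len]
      intro heq
      exact hnm (heq ▸ List.getElem_mem hj'len)
    · exact Or.inl (by omega)

-- B's merge fold computes the filter of its input list by non-membership in sv,
-- for any ascending input list whose elements dominate the consumed prefix
lemma comp_fold (sv : List Int) (hs : sv.Pairwise (· ≤ ·)) :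
    ∀ (is : List Int), is.Pairwise (· ≤ ·) →
    ∀ (j : Nat) (acc : List Int), j ≤ sv.length →
    (∀ i ∈ is, ∀ k, k < j → sv.getD k 0 < i) →
    ((is.foldl (pvCompStep sv) (j, acc)).2
      = acc ++ is.filter (fun i => !(sv.contains i))) := by
  intro is
  induction is with
  | nil => intro _ j acc _ _; simp
  | cons i tl ih =>
    intro hpair j acc hj hdom
    obtain ⟨hadv1, hadv2, hadv3⟩ :=
      pvAdvance_spec sv i j hj (hdom i List.mem_cons_self)
    have htl_pair := hpair.of_cons
    have hhead := (List.pairwise_cons.mp hpair).1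
    have htest := comp_test_iff sv hs i (pvAdvance sv i j) hadv1 hadv2 hadv3
    have hdom' : ∀ i' ∈ tl, ∀ k, k < pvAdvance sv i j → sv.getD k 0 < i' :=
      fun i' hi' k hk => lt_of_lt_of_le (hadv2 k hk) (hhead i' hi')
    simp only [List.foldl_cons, List.filter_cons]
    by_cases hmem : i ∈ sv
    · have hc : ¬ (pvAdvance sv i j = sv.length ∨ sv.getD (pvAdvance sv i j) 0 ≠ i) := by
        intro h; exact (htest.mp h) hmem
      have hstep : pvCompStep sv (j, acc) i = (pvAdvance sv i j, acc) := by
        simp only [pvCompStep]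
        rw [if_neg hc]
      rw [hstep, ih htl_pair _ acc hadv1 hdom']
      simp [hmem]
    · have hc : (pvAdvance sv i j = sv.length ∨ sv.getD (pvAdvance sv i j) 0 ≠ i) :=
        htest.mpr hmem
      have hstep : pvCompStep sv (j, acc) i = (pvAdvance sv i j, acc ++ [i]) := by
        simp only [pvCompStep]
        rw [if_pos hc]
      rw [hstep, ih htl_pair _ (acc ++ [i]) hadv1 hdom']
      simp [hmem]

-- B's _complement is the range filtered by non-membership in vals
lemma pvComplement_eq_filter (vals : List Int) (n : Int) :
    pvComplement vals n
      = (PySem.List.pyRange 0 n 1).filter (fun i => !(vals.contains i)) := by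
  have hs : (PySem.List.sorted vals (fun x => x) false).Pairwise (· ≤ ·) := by
    simpa using PySem.List.sorted_pairwise vals (fun x => x)
  unfold pvComplement
  rw [comp_fold _ hs _ ((PySem.List.pairwise_lt_pyRange_one 0 n).imp le_of_lt)
        0 [] (Nat.zero_le _) (by intro _ _ k hk; omega)]
  simp only [List.nil_append]
  apply List.filter_congr
  intro x _
  simp [PySem.List.mem_sorted]

-- B's collecting fold is the pair of maps of the parsed components
lemma collect_eq_map (als : List String) :
    ∀ (accL accR : List Int),
    als.foldl (fun st pair => (st.1 ++ [(pvParse pair).1], st.2 ++ [(pvParse pair).2]))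
        (accL, accR)
      = (accL ++ als.map (fun a => (pvParse a).1),
         accR ++ als.map (fun a => (pvParse a).2)) := by
  induction als with
  | nil => simp
  | cons a tl ih => intro accL accR; simp [ih]

-- A's conditional-erase step on a duplicate-free base list, seen through a filter
lemma erase_step (base : List Int) (hb : base.Nodup) (p : Int → Bool) (v : Int) :
    (if v ∈ base.filter p then (base.filter p).erase v else base.filter p)
      = base.filter (fun x => p x && !(x == v)) := by
  by_cases h : v ∈ base.filter p
  · rw [if_pos h, List.Nodup.erase_eq_filter (hb.filter p)]
    rw [List.filter_filter]
    apply List.filter_congr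
    intro x _
    by_cases hxv : x = v
    · simp [hxv]
    · simp [bne, Bool.and_comm]
  · rw [if_neg h]
    apply List.filter_congr
    intro x hx
    by_cases hxv : x = v
    · subst hxv
      by_cases hp : p x
      · exact absurd (List.mem_filter.mpr ⟨hx, hp⟩) h
      · simp [hp]
    · simp [hxv]

-- A's loop invariant: the remaining-index lists are the base ranges filtered by
-- non-membership in the list of parsed pairs seen so far
lemma loop_inv (als : List String) (bl br : List Int) (hbl : bl.Nodup) (hbr : br.Nodup)
    (seenL seenR : List Int) :
    als.foldl hasNullStep
      (bl.filter (fun i => !(seenL.contains i)),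
       br.filter (fun i => !(seenR.contains i)))
    = (bl.filter (fun i => !((seenL ++ als.map (fun a => (pvParse a).1)).contains i)),
       br.filter (fun i => !((seenR ++ als.map (fun a => (pvParse a).2)).contains i))) := by
  induction als generalizing seenL seenR with
  | nil => simp
  | cons a tl ih =>
    simp only [List.foldl_cons]
    have h1 : (if (pvParse a).1 ∈ bl.filter (fun i => !(seenL.contains i))
        then (bl.filter (fun i => !(seenL.contains i))).erase (pvParse a).1
        else bl.filter (fun i => !(seenL.contains i)))
        = bl.filter (fun i => !((seenL ++ [(pvParse a).1]).contains i)) := by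
      rw [erase_step bl hbl]
      apply List.filter_congr
      intro x _
      by_cases hx : x = (pvParse a).1 <;> simp [hx]
    have h2 : (if (pvParse a).2 ∈ br.filter (fun i => !(seenR.contains i))
        then (br.filter (fun i => !(seenR.contains i))).erase (pvParse a).2
        else br.filter (fun i => !(seenR.contains i)))
        = br.filter (fun i => !((seenR ++ [(pvParse a).2]).contains i)) := by
      rw [erase_step br hbr]
      apply List.filter_congr
      intro x _
      by_cases hx : x = (pvParse a).2 <;> simp [hx]
    have hstep : hasNullStep
        (bl.filter (fun i => !(seenL.contains i)),
         br.filter (fun i => !(seenR.contains i))) a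
        = (bl.filter (fun i => !((seenL ++ [(pvParse a).1]).contains i)),
           br.filter (fun i => !((seenR ++ [(pvParse a).2]).contains i))) := by
      unfold hasNullStep
      rw [← h1, ← h2]
    rw [hstep, ih]
    simp

-- ===== VERDICT (by name: the statement is the Claim_ definition above) =====
theorem hasNull_spec : Claim_equal_hasNull := by
  intro alignments lNumWords rNumWords _ _
  unfold Spec_hasNull hasNull hasNull_alt
  rw [collect_eq_map alignments [] []]
  simp only [List.nil_append, pvComplement_eq_filter]
  have h := loop_inv alignments
    (PySem.List.pyRange 0 lNumWords 1) (PySem.List.pyRange 0 rNumWords 1)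
    (PySem.List.nodup_pyRange_one _ _) (PySem.List.nodup_pyRange_one _ _) [] []
  simpa using h
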